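-- pv_equiv track=rewrite | github.com/MyTooliT/ICOc | mytoolit/old/MyToolItCommands.py | sArray2String
-- ===== SOURCE A (Python) =====
-- def sArray2String(Name):
--     for i in range(0, len(Name)):
--         Name[i] = chr(Name[i])
--         i += 1
--     Name = "".join(Name)
--     for character in range(0, ord(" ")):
--         Name = Name[0:8].replace(chr(character), "")
--     for character in range(128, 0xFF):
--         Name = Name[0:8].replace(chr(character), "")
--     return Name
-- ===== SOURCE B (Python) =====
-- def sArray2String(Name):
--     # same in-place mutation of the argument as the original (ints -> chars)
--     for i in range(len(Name)):
--         Name[i] = chr(Name[i])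
--     # one filtering pass over the first 8 characters instead of 159 .replace scans
--     return "".join(c for c in Name[:8] if not (ord(c) < 32 or 128 <= ord(c) < 255))
-- ===== Notes on version B (the rewrite author's own statement) =====
-- stated objective: simpler
-- what changed: A removes forbidden characters by looping over all 159 forbidden code points, re-truncating to 8 chars and calling str.replace each time; B makes one filtering pass over the first 8 characters testing the code ranges directly.
-- outside the precondition, e.g. on sArray2String([65, 65, 65, 65, 65, 65, 65, 65, 55296]): A returns 'AAAAAAAA', B returns 'AAAAAAAA'
import Mathlib
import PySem

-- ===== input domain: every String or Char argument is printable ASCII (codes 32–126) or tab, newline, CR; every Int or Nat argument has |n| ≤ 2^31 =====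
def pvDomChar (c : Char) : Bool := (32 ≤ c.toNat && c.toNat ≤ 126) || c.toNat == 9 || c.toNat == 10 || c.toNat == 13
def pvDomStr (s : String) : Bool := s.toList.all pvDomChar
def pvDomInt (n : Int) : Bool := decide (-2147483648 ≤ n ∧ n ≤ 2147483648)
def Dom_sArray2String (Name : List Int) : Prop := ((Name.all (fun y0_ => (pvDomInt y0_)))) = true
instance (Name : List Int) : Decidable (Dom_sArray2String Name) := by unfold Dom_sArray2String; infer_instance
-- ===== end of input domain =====

-- B replaces A's 159 truncate-and-.replace passes by one filtering pass over the first 8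
-- characters; both keep A's in-place int→char mutation of Name (return value is what is proved).

-- ===== PORT A =====
-- chr(n) on the Pre_ domain (0 ≤ n < 0x110000, no surrogates) is exactly Char.ofNat n.toNat
def sArray2String (Name : List Int) : String :=
  let chars := Name.map (fun n => Char.ofNat n.toNat)          -- the mutation loop + "".join
  let s1 := (PySem.List.pyRange 0 32).foldl
      (fun s c => PySem.Chars.replace (PySem.Chars.slice s (some 0) (some 8))
                    [Char.ofNat c.toNat] []) chars
  let s2 := (PySem.List.pyRange 128 255).foldl
      (fun s c => PySem.Chars.replace (PySem.Chars.slice s (some 0) (some 8))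
                    [Char.ofNat c.toNat] []) s1
  String.ofList s2

-- ===== PORT B =====
def sArray2String_alt (Name : List Int) : String :=
  let chars := Name.map (fun n => Char.ofNat n.toNat)          -- same in-place mutation
  String.ofList ((chars.take 8).filter
      (fun c => !(c.toNat < 32 || (128 ≤ c.toNat && c.toNat < 255))))

-- ===== PRECONDITION & SPEC =====
-- Pre_ excludes elements on which Python's chr raises ValueError (outside [0, 0x110000)) and the
-- surrogate code points 0xD800–0xDFFF, where both programs return the same lone-surrogate string,
-- which has no counterpart in Lean's String type.
def Pre_sArray2String (Name : List Int) : Prop :=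
  ∀ n ∈ Name, 0 ≤ n ∧ n < 1114112 ∧ ¬(55296 ≤ n ∧ n < 57344)
instance (Name : List Int) : Decidable (Pre_sArray2String Name) := by
  unfold Pre_sArray2String; infer_instance
def pvWitness_sArray2String : List Int := [72, 101, 108, 108, 111]

def Spec_sArray2String (Name : List Int) (out : String) : Prop := out = sArray2String_alt Name
instance (Name : List Int) (out : String) : Decidable (Spec_sArray2String Name out) := by
  unfold Spec_sArray2String; infer_instance

-- ===== CLAIM (what is proved, stated in full; the proofs are below) =====
def Claim_equal_sArray2String : Prop :=
  ∀ (Name : List Int), Dom_sArray2String Name → Pre_sArray2String Name →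
    Spec_sArray2String Name (sArray2String Name)

-- ===== LEMMAS AND PROOFS =====

-- replace by the empty string with a one-character pattern is a filter
theorem replace_go_filter (c : Char) (fuel : Nat) (l acc : List Char) (h : l.length ≤ fuel) :
    PySem.Chars.replace.go [c] [] fuel l acc = acc.reverse ++ l.filter (fun a => a ≠ c) := by
  induction fuel generalizing l acc with
  | zero =>
    have : l = [] := List.eq_nil_of_length_eq_zero (Nat.le_zero.mp h)
    subst this; simp [PySem.Chars.replace.go]
  | succ fuel ih =>
    cases l with
    | nil => simp [PySem.Chars.replace.go]
    | cons c' t =>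
      simp only [PySem.Chars.replace.go, List.isPrefixOf, Bool.and_true]
      by_cases hc : c = c'
      · subst hc
        simp only [beq_self_eq_true, if_pos]
        rw [show ([c].length) = 1 from rfl, List.drop_one, List.tail_cons]
        simp only [List.reverse_nil, List.nil_append]
        rw [ih t acc (by simp at h; omega)]
        simp
      · have hbeq : (c == c') = false := beq_false_of_ne hc
        simp only [hbeq, if_neg, Bool.false_eq_true, not_false_iff]
        rw [ih t (c' :: acc) (by simpa using h)]
        simp [Ne.symm hc]

theorem replace_single_filter (c : Char) (l : List Char) :
    PySem.Chars.replace l [c] [] = l.filter (fun a => a ≠ c) := by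
  rw [PySem.Chars.replace]
  simp only [List.isEmpty_cons, Bool.false_eq_true, if_neg, not_false_iff]
  exact replace_go_filter c l.length l [] le_rfl

-- Name[0:8] on a list is take 8
theorem slice08 (l : List Char) :
    PySem.Chars.slice l (some 0) (some 8) = l.take 8 := by
  rw [PySem.Chars.slice_eq_listSlice, PySem.List.slice_zero_start,
    PySem.List.slice_to l (by norm_num : (0:Int) ≤ 8)]
  rfl

-- A's repeated truncate-then-remove loop is one truncation followed by one filter
theorem foldl_take8_filter (ds : List Char) (s : List Char) (hd : ds ≠ []) :
    ds.foldl (fun t c => (t.take 8).filter (fun a => a ≠ c)) s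
      = (s.take 8).filter (fun a => a ∉ ds) := by
  induction ds generalizing s with
  | nil => exact absurd rfl hd
  | cons c cs ih =>
    rw [List.foldl_cons]
    cases cs with
    | nil => simp
    | cons c' cs' =>
      rw [ih _ (by simp)]
      have hlen : ((s.take 8).filter (fun a => a ≠ c)).length ≤ 8 :=
        le_trans (List.length_filter_le _ _) (by simp)
      rw [List.take_of_length_le hlen, List.filter_filter]
      apply List.filter_congr
      intro a _
      rw [Bool.eq_iff_iff]
      simp only [Bool.and_eq_true, decide_eq_true_eq, List.mem_cons]
      tauto

-- the two removal alphabets, characterised by code ranges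
theorem mem_chr_range (a : Char) (lo hi : Int) (hlo : 0 ≤ lo) (hhi : hi ≤ 55296) :
    a ∈ (PySem.List.pyRange lo hi).map (fun k => Char.ofNat k.toNat)
      ↔ lo ≤ (a.toNat : Int) ∧ (a.toNat : Int) < hi := by
  simp only [List.mem_map, PySem.List.mem_pyRange_one]
  constructor
  · rintro ⟨k, ⟨hk1, hk2⟩, rfl⟩
    have hvalid : k.toNat.isValidChar := by left; omega
    rw [Char.toNat_ofNat, if_pos hvalid]
    omega
  · rintro ⟨h1, h2⟩
    exact ⟨(a.toNat : Int), ⟨by omega, by omega⟩, by simpa using Char.ofNat_toNat a⟩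

-- ===== VERDICT (by name: the statement is the Claim_ definition above) =====
theorem sArray2String_spec : Claim_equal_sArray2String := by
  intro Name _ _
  unfold Spec_sArray2String
  show sArray2String Name = sArray2String_alt Name
  have hstep : ∀ (ds : List Int) (s : List Char),
      ds.foldl (fun t c => PySem.Chars.replace (PySem.Chars.slice t (some 0) (some 8))
                    [Char.ofNat c.toNat] []) s
        = (ds.map (fun k => Char.ofNat k.toNat)).foldl
            (fun t c => (t.take 8).filter (fun a => a ≠ c)) s := by
    intro ds s
    rw [List.foldl_map]
    congr 1
    funext t c
    rw [slice08, replace_single_filter]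
  simp only [sArray2String, sArray2String_alt]
  rw [hstep, hstep, foldl_take8_filter _ _ (by decide),
    foldl_take8_filter _ _ (by decide)]
  have hlen : (((Name.map (fun n => Char.ofNat n.toNat)).take 8).filter
      (fun a => a ∉ (PySem.List.pyRange 0 32).map (fun k => Char.ofNat k.toNat))).length ≤ 8 :=
    le_trans (List.length_filter_le _ _) (by simp)
  rw [List.take_of_length_le hlen, List.filter_filter]
  congr 1
  apply List.filter_congr
  intro a _
  rw [Bool.eq_iff_iff]
  simp [mem_chr_range a 0 32 (by norm_num) (by norm_num),
    mem_chr_range a 128 255 (by norm_num) (by norm_num)]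
  omega
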